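-- pv_equiv track=rewrite | github.com/ASSERT-KTH/Mokav | experiments/pynguin/c4b/return-lst/generated_tests/src_2261/9/src_2261.py | func
-- ===== SOURCE A (Python) =====
-- def func(*args):
-- 	ret_values = []
--
--
-- 	def larger(a, b):
-- 	    if (a > b):
-- 	        return a
-- 	    else:
-- 	        return b
-- 	lisa = args[0]
-- 	index = ([0] * len(lisa))
-- 	if ('h' in lisa):
-- 	    lisa = lisa[lisa.index('h'):]
-- 	jin = ''
-- 	for i in range(len(lisa)):
-- 	    if ((lisa[i] == 'h') or (lisa[i] == 'e') or (lisa[i] == 'l') or (lisa[i] == 'o')):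
-- 	        jin += lisa[i]
-- 	kate = ''
-- 	count = 0
-- 	for i in range(len(jin)):
-- 	    if (jin[i] == 'h'):
-- 	        count = i
-- 	        kate += 'h'
-- 	        break
-- 	count2 = 0
-- 	for i in range(count, len(jin)):
-- 	    if (jin[i] == 'e'):
-- 	        count2 = i
-- 	        kate += 'e'
-- 	        break
-- 	count3 = 0
-- 	for i in range(count2, len(jin)):
-- 	    if (count3 > 0):
-- 	        break
-- 	    for j in range(count2, len(jin)):
-- 	        if (((jin[i] + jin[j]) == 'll') and (i != j)):
-- 	            count3 = larger(i, j)
-- 	            kate += 'll'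
-- 	            break
-- 	for i in range(count3, len(jin)):
-- 	    if (jin[i] == 'o'):
-- 	        kate += 'o'
-- 	        break
-- 	if (kate == 'hello'):
-- 	    ret_values.append('YES')
-- 	else:
-- 	    ret_values.append('NO')
--
-- 	return ret_values
-- ===== SOURCE B (Python) =====
-- def func(*args):
--     rem = "hello"
--     for c in args[0]:
--         if rem and c == rem[0]:
--             rem = rem[1:]
--     return ["YES" if not rem else "NO"]
-- ===== Notes on version B (the rewrite author's own statement) =====
-- stated objective: faster
-- what changed: Replaced A's trim-filter-and-four-index-search pipeline (whose double-l search rescans the whole filtered string for every outer position, making it quadratic) by a single linear greedy scan that matches the five-letter target word as a subsequence of the input.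
import Mathlib
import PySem

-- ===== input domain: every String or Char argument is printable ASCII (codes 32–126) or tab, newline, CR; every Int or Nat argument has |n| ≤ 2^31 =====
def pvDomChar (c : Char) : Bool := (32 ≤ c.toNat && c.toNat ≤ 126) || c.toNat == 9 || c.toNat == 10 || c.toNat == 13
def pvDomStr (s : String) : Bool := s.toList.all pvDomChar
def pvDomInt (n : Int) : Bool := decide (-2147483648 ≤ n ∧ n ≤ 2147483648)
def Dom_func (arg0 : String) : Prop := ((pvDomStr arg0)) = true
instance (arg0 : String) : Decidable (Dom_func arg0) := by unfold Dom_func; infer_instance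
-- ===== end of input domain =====

-- B replaces A's quadratic trim/filter/four-index-search pipeline by one linear greedy
-- subsequence scan for "hello" (objective: faster).

-- ===== PORT A =====
-- helper 'larger' of A
def larger (a b : Nat) : Nat := if a > b then a else b

-- "for i in range(len(jin)): if jin[i]=='h': count=i; kate+='h'; break"
-- (iterating elements of the suffix with their running index n; count stays 0 when not found)
def loopH : List Char → Nat → Nat × String
  | [], _ => (0, "")
  | c :: r, n => if c = 'h' then (n, "h") else loopH r (n + 1)

-- "for i in range(count, len(jin)): if jin[i]=='e': count2=i; kate+='e'; break"
def loopE : List Char → Nat → Nat × String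
  | [], _ => (0, "")
  | c :: r, n => if c = 'e' then (n, "e") else loopE r (n + 1)

-- inner loop "for j in range(count2, len(jin)): if jin[i]+jin[j]=='ll' and i!=j: ..."
-- (jin[i]+jin[j]=='ll' on 1-char strings is rendered as the char-list equation [ci, c] = ['l','l'])
def loopJ (ci : Char) (i : Nat) : List Char → Nat → Option Nat
  | [], _ => none
  | c :: r, j => if [ci, c] = ['l', 'l'] ∧ i ≠ j then some (larger i j) else loopJ ci i r (j + 1)

-- outer loop "for i in range(count2, len(jin)): if count3 > 0: break; <inner>";
-- count3 = larger i j with i ≠ j is always > 0, so 'stop right after the inner loop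
-- succeeds' is exactly the python's 'break on count3 > 0 at the top of the next iteration'
def loopI (v : List Char) (c2 : Nat) : List Char → Nat → Nat × String
  | [], _ => (0, "")
  | c :: w, i =>
    match loopJ c i v c2 with
    | some k => (k, "ll")
    | none => loopI v c2 w (i + 1)

-- "for i in range(count3, len(jin)): if jin[i]=='o': kate+='o'; break"
def loopO : List Char → String
  | [] => ""
  | c :: r => if c = 'o' then "o" else loopO r

def func (arg0 : String) : List String :=
  let lisa0 := arg0.toList
  let _index : List Int := List.replicate lisa0.length 0   -- 'index = [0]*len(lisa)' (unused by A)
  -- "if 'h' in lisa: lisa = lisa[lisa.index('h'):]" — index of a present element is findIdx,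
  -- the slice from that nonnegative in-range index is drop
  let lisa := if lisa0.contains 'h' then lisa0.drop (lisa0.findIdx (fun c => c == 'h')) else lisa0
  -- "jin = ''; for i in ...: if lisa[i] in 'helo'-chars: jin += lisa[i]"
  let jin := lisa.foldl (fun acc c => if c = 'h' ∨ c = 'e' ∨ c = 'l' ∨ c = 'o' then acc ++ [c] else acc) []
  let p1 := loopH jin 0
  let p2 := loopE (jin.drop p1.1) p1.1
  let p3 := loopI (jin.drop p2.1) p2.1 (jin.drop p2.1) p2.1
  let p4 := loopO (jin.drop p3.1)
  let kate := p1.2 ++ p2.2 ++ p3.2 ++ p4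
  if kate = "hello" then ["YES"] else ["NO"]

-- ===== PORT B =====
-- "if rem and c == rem[0]: rem = rem[1:]" with rem the still-unmatched part of "hello"
def stepB : List Char → Char → List Char
  | [], _ => []
  | p :: ps, c => if c = p then ps else p :: ps

def func_alt (arg0 : String) : List String :=
  if arg0.toList.foldl stepB ['h', 'e', 'l', 'l', 'o'] = [] then ["YES"] else ["NO"]

-- ===== PRECONDITION & SPEC =====
def Spec_func (arg0 : String) (out : List String) : Prop := out = func_alt arg0
instance (arg0 : String) (out : List String) : Decidable (Spec_func arg0 out) := by unfold Spec_func; infer_instance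

-- ===== CLAIM (what is proved, stated in full; the proofs are below) =====
def Claim_equal_func : Prop := ∀ (arg0 : String), Dom_func arg0 → Spec_func arg0 (func arg0)

-- ===== LEMMAS AND PROOFS =====

-- the pattern both programs look for
def pat : List Char := ['h', 'e', 'l', 'l', 'o']

-- A's filtered string and kate computation, named for the proofs
def jinOf (arg0 : String) : List Char :=
  let lisa0 := arg0.toList
  let lisa := if lisa0.contains 'h' then lisa0.drop (lisa0.findIdx (fun c => c == 'h')) else lisa0
  lisa.foldl (fun acc c => if c = 'h' ∨ c = 'e' ∨ c = 'l' ∨ c = 'o' then acc ++ [c] else acc) []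

def kateOf (t : List Char) : String :=
  let p1 := loopH t 0
  let p2 := loopE (t.drop p1.1) p1.1
  let p3 := loopI (t.drop p2.1) p2.1 (t.drop p2.1) p2.1
  p1.2 ++ p2.2 ++ p3.2 ++ loopO (t.drop p3.1)

theorem func_eq (arg0 : String) :
    func arg0 = if kateOf (jinOf arg0) = "hello" then ["YES"] else ["NO"] := rfl

-- generic sublist facts ---------------------------------------------------

theorem sub_cons_of_ne {a b : Char} {r u : List Char} (h : a ≠ b) :
    List.Sublist (a :: r) (b :: u) ↔ List.Sublist (a :: r) u := by
  constructor
  · intro hs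
    cases hs with
    | cons _ h2 => exact h2
    | cons₂ _ h2 => exact absurd rfl h
  · intro hs; exact hs.cons _

theorem sub_through_first {c : Char} {r : List Char} :
    ∀ (a : List Char) {b : List Char}, c ∉ a →
      (List.Sublist (c :: r) (a ++ c :: b) ↔ List.Sublist r b) := by
  intro a
  induction a with
  | nil => intro b _; simpa using List.cons_sublist_cons
  | cons x xs ih =>
      intro b h
      have hxc : c ≠ x := fun he => h (by simp [he])
      rw [List.cons_append, sub_cons_of_ne hxc]
      exact ih (fun hm => h (List.mem_cons_of_mem _ hm))

theorem exists_first_split {c : Char} : ∀ {s : List Char}, c ∈ s →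
    ∃ a b, s = a ++ c :: b ∧ c ∉ a ∧ s.findIdx (fun x => x == c) = a.length := by
  intro s hs
  induction s with
  | nil => cases hs
  | cons x t ih =>
      by_cases hx : x = c
      · exact ⟨[], t, by simp [hx], by simp, by simp [List.findIdx_cons, hx]⟩
      · have hct : c ∈ t := by
          rcases List.mem_cons.mp hs with h | h
          · exact absurd h.symm hx
          · exact h
        obtain ⟨a, b, he, ha, hi⟩ := ih hct
        have hxc : (x == c) = false := by simp [hx]
        refine ⟨x :: a, b, by simp [he], ?_, ?_⟩
        · intro hm
          rcases List.mem_cons.mp hm with h | h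
          · exact hx h.symm
          · exact ha h
        · simp [List.findIdx_cons, hxc, hi]

theorem split_of_mem {c : Char} {u : List Char} (h : c ∈ u) :
    ∃ p r, u = p ++ c :: r ∧ c ∉ p := by
  obtain ⟨p, r, he, hp, -⟩ := exists_first_split h
  exact ⟨p, r, he, hp⟩

-- B side: the greedy scan succeeds iff the pattern is a sublist ----------

theorem stepB_nil : ∀ s : List Char, s.foldl stepB [] = [] := by
  intro s; induction s with
  | nil => rfl
  | cons c s ih => simpa [stepB] using ih

theorem greedy : ∀ (s rem : List Char), s.foldl stepB rem = [] ↔ List.Sublist rem s := by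
  intro s
  induction s with
  | nil =>
      intro rem
      constructor
      · intro h; simp_all
      · intro h; simpa using List.sublist_nil.mp h
  | cons c s ih =>
      intro rem
      cases rem with
      | nil => simp [stepB, stepB_nil]
      | cons p ps =>
          by_cases hc : c = p
          · subst hc
            rw [List.foldl_cons, show stepB (c :: ps) c = ps from by simp [stepB], ih ps]
            constructor
            · intro h; exact List.cons_sublist_cons.mpr h
            · intro h
              cases h with
              | cons _ h2 => exact (List.sublist_cons_self c ps).trans h2
              | cons₂ _ h2 => exact h2
          · rw [List.foldl_cons, show stepB (p :: ps) c = p :: ps from by simp [stepB, hc],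
              ih (p :: ps)]
            exact (sub_cons_of_ne (fun he => hc he.symm)).symm

-- A side: characterisations of the four loops ----------------------------

theorem loopH_not {t : List Char} (h : 'h' ∉ t) : ∀ n, loopH t n = (0, "") := by
  induction t with
  | nil => intro n; rfl
  | cons c r ih =>
      intro n
      have hc : c ≠ 'h' := fun he => h (by simp [he])
      simp only [loopH, if_neg hc]
      exact ih (fun hm => h (List.mem_cons_of_mem _ hm)) _

theorem loopH_found : ∀ (a : List Char) (b : List Char) (n : Nat), 'h' ∉ a →
    loopH (a ++ 'h' :: b) n = (n + a.length, "h") := by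
  intro a
  induction a with
  | nil => intro b n _; simp [loopH]
  | cons x xs ih =>
      intro b n h
      have hx : x ≠ 'h' := fun he => h (by simp [he])
      simp only [List.cons_append, loopH, if_neg hx]
      rw [ih b (n + 1) (fun hm => h (List.mem_cons_of_mem _ hm))]
      simp; omega

theorem loopE_not {t : List Char} (h : 'e' ∉ t) : ∀ n, loopE t n = (0, "") := by
  induction t with
  | nil => intro n; rfl
  | cons c r ih =>
      intro n
      have hc : c ≠ 'e' := fun he => h (by simp [he])
      simp only [loopE, if_neg hc]
      exact ih (fun hm => h (List.mem_cons_of_mem _ hm)) _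

theorem loopE_found : ∀ (a : List Char) (b : List Char) (n : Nat), 'e' ∉ a →
    loopE (a ++ 'e' :: b) n = (n + a.length, "e") := by
  intro a
  induction a with
  | nil => intro b n _; simp [loopE]
  | cons x xs ih =>
      intro b n h
      have hx : x ≠ 'e' := fun he => h (by simp [he])
      simp only [List.cons_append, loopE, if_neg hx]
      rw [ih b (n + 1) (fun hm => h (List.mem_cons_of_mem _ hm))]
      simp; omega

theorem loopE_shape (t : List Char) (n : Nat) : (loopE t n).2 = "e" ∨ (loopE t n).2 = "" := by
  induction t generalizing n with
  | nil => right; rfl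
  | cons c r ih =>
      by_cases hc : c = 'e'
      · left; simp [loopE, hc]
      · simpa [loopE, hc] using ih (n + 1)

theorem loopJ_none_of_ci {ci : Char} (h : ci ≠ 'l') (i : Nat) :
    ∀ (u : List Char) (j : Nat), loopJ ci i u j = none := by
  intro u
  induction u with
  | nil => intro j; rfl
  | cons c r ih =>
      intro j
      have hcond : ¬([ci, c] = ['l', 'l'] ∧ i ≠ j) := by
        rintro ⟨h1, -⟩; simp at h1; exact h h1.1
      rw [show loopJ ci i (c :: r) j
            = if [ci, c] = ['l', 'l'] ∧ i ≠ j then some (larger i j) else loopJ ci i r (j + 1)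
          from rfl, if_neg hcond]
      exact ih _

theorem loopJ_none_of_nol {u : List Char} (h : 'l' ∉ u) (ci : Char) (i : Nat) :
    ∀ j, loopJ ci i u j = none := by
  induction u with
  | nil => intro j; rfl
  | cons c r ih =>
      intro j
      have hc : c ≠ 'l' := fun he => h (by simp [he])
      have hcond : ¬([ci, c] = ['l', 'l'] ∧ i ≠ j) := by
        rintro ⟨h1, -⟩; simp at h1; exact hc h1.2
      rw [show loopJ ci i (c :: r) j
            = if [ci, c] = ['l', 'l'] ∧ i ≠ j then some (larger i j) else loopJ ci i r (j + 1)
          from rfl, if_neg hcond]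
      exact ih (fun hm => h (List.mem_cons_of_mem _ hm)) _

theorem loopJ_skip {p : List Char} (hp : 'l' ∉ p) (i : Nat) (u : List Char) :
    ∀ j, loopJ 'l' i (p ++ u) j = loopJ 'l' i u (j + p.length) := by
  induction p with
  | nil => intro j; simp
  | cons x xs ih =>
      intro j
      have hx : x ≠ 'l' := fun he => hp (by simp [he])
      have hcond : ¬([('l' : Char), x] = ['l', 'l'] ∧ i ≠ j) := by
        rintro ⟨h1, -⟩; simp at h1; exact hx h1
      rw [List.cons_append,
        show loopJ 'l' i (x :: (xs ++ u)) j
            = if [('l' : Char), x] = ['l', 'l'] ∧ i ≠ j then some (larger i j)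
              else loopJ 'l' i (xs ++ u) (j + 1)
          from rfl, if_neg hcond,
        ih (fun hm => hp (List.mem_cons_of_mem _ hm)) (j + 1)]
      congr 1; simp; omega

theorem larger_eq_right {a b : Nat} (h : a < b) : larger a b = b := by
  simp [larger]; omega

theorem loopJ_self {u : List Char} {i : Nat} :
    loopJ 'l' i ('l' :: u) i = loopJ 'l' i u (i + 1) := by
  rw [show loopJ 'l' i ('l' :: u) i
        = if [('l' : Char), 'l'] = ['l', 'l'] ∧ i ≠ i then some (larger i i)
          else loopJ 'l' i u (i + 1)
      from rfl, if_neg (by simp)]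

theorem loopJ_hit {u : List Char} {i j : Nat} (h : i ≠ j) :
    loopJ 'l' i ('l' :: u) j = some (larger i j) := by
  rw [show loopJ 'l' i ('l' :: u) j
        = if [('l' : Char), 'l'] = ['l', 'l'] ∧ i ≠ j then some (larger i j)
          else loopJ 'l' i u (j + 1)
      from rfl, if_pos ⟨rfl, h⟩]

theorem loopI_skip {v : List Char} {c2 : Nat} {w1 : List Char} (h : 'l' ∉ w1) (w2 : List Char) :
    ∀ i, loopI v c2 (w1 ++ w2) i = loopI v c2 w2 (i + w1.length) := by
  induction w1 with
  | nil => intro i; simp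
  | cons x xs ih =>
      intro i
      have hx : x ≠ 'l' := fun he => h (by simp [he])
      simp only [List.cons_append, loopI, loopJ_none_of_ci hx]
      rw [ih (fun hm => h (List.mem_cons_of_mem _ hm)) (i + 1)]
      congr 1; simp; omega

theorem loopI_trail {v : List Char} {c2 : Nat} {w : List Char} (h : 'l' ∉ w) :
    ∀ i, loopI v c2 w i = (0, "") := by
  induction w with
  | nil => intro i; rfl
  | cons x xs ih =>
      intro i
      have hx : x ≠ 'l' := fun he => h (by simp [he])
      simp only [loopI, loopJ_none_of_ci hx]
      exact ih (fun hm => h (List.mem_cons_of_mem _ hm)) _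

theorem loopI_shape (v : List Char) (c2 : Nat) (w : List Char) :
    ∀ i, (loopI v c2 w i).2 = "ll" ∨ (loopI v c2 w i).2 = "" := by
  induction w with
  | nil => intro i; right; rfl
  | cons x xs ih =>
      intro i
      simp only [loopI]
      cases hj : loopJ x i v c2 with
      | some k => left; rfl
      | none => exact ih _

-- exactly one 'l' after count2: the inner loop only ever sees j = i and never fires
theorem loopI_one {c2 : Nat} {p r : List Char} (hp : 'l' ∉ p) (hr : 'l' ∉ r) :
    loopI (p ++ 'l' :: r) c2 (p ++ 'l' :: r) c2 = (0, "") := by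
  rw [loopI_skip hp]
  have hJ : loopJ 'l' (c2 + p.length) (p ++ 'l' :: r) c2 = none := by
    rw [loopJ_skip hp, loopJ_self]
    exact loopJ_none_of_nol hr _ _ _
  simp only [loopI, hJ]
  exact loopI_trail hr _

-- at least two 'l' after count2: count3 = index of the second one, kate += 'll'
theorem loopI_two {c2 : Nat} {p q : List Char} (r : List Char) (hp : 'l' ∉ p) (hq : 'l' ∉ q) :
    loopI (p ++ 'l' :: (q ++ 'l' :: r)) c2 (p ++ 'l' :: (q ++ 'l' :: r)) c2
      = (c2 + p.length + 1 + q.length, "ll") := by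
  rw [loopI_skip hp]
  have hJ : loopJ 'l' (c2 + p.length) (p ++ 'l' :: (q ++ 'l' :: r)) c2
      = some (c2 + p.length + 1 + q.length) := by
    rw [loopJ_skip hp, loopJ_self, loopJ_skip hq, loopJ_hit (by omega),
      larger_eq_right (by omega)]
  simp only [loopI, hJ]

theorem loopO_not {u : List Char} (h : 'o' ∉ u) : loopO u = "" := by
  induction u with
  | nil => rfl
  | cons c r ih =>
      have hc : c ≠ 'o' := fun he => h (by simp [he])
      simp only [loopO, if_neg hc]
      exact ih (fun hm => h (List.mem_cons_of_mem _ hm))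

theorem loopO_mem {u : List Char} (h : 'o' ∈ u) : loopO u = "o" := by
  induction u with
  | nil => cases h
  | cons c r ih =>
      by_cases hc : c = 'o'
      · simp [loopO, hc]
      · have hr : 'o' ∈ r := by
          rcases List.mem_cons.mp h with h1 | h1
          · exact absurd h1.symm hc
          · exact h1
        simp [loopO, hc, ih hr]

theorem loopO_shape (u : List Char) : loopO u = "o" ∨ loopO u = "" := by
  by_cases h : 'o' ∈ u
  · left; exact loopO_mem h
  · right; exact loopO_not h

-- drop at an append boundary
theorem drop_at {A B : List Char} {n : Nat} (h : n = A.length) : (A ++ B).drop n = B := by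
  subst h; exact List.drop_left

-- shape combinations that can never spell "hello"
theorem kate_no_ll (k4 : String) (h4 : k4 = "o" ∨ k4 = "") :
    ¬ ("h" ++ "e" ++ "" ++ k4 = "hello") := by
  rcases h4 with rfl | rfl <;> decide

theorem kate_no_e (k3 k4 : String) (h3 : k3 = "ll" ∨ k3 = "") (h4 : k4 = "o" ∨ k4 = "") :
    ¬ ("h" ++ "" ++ k3 ++ k4 = "hello") := by
  rcases h3 with rfl | rfl <;> rcases h4 with rfl | rfl <;> decide

theorem kate_no_h (k2 k3 k4 : String) (h2 : k2 = "e" ∨ k2 = "") (h3 : k3 = "ll" ∨ k3 = "")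
    (h4 : k4 = "o" ∨ k4 = "") : ¬ ("" ++ k2 ++ k3 ++ k4 = "hello") := by
  rcases h2 with rfl | rfl <;> rcases h3 with rfl | rfl <;> rcases h4 with rfl | rfl <;> decide

-- the core: A's kate equals "hello" iff "hello" is a sublist of the filtered string
theorem coreA (t : List Char) : kateOf t = "hello" ↔ List.Sublist pat t := by
  rw [show pat = ['h', 'e', 'l', 'l', 'o'] from rfl]
  by_cases hh : 'h' ∈ t
  · obtain ⟨a, b, rfl, ha⟩ := split_of_mem hh
    have h1 : loopH (a ++ 'h' :: b) 0 = (a.length, "h") := by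
      rw [loopH_found a b 0 ha]; simp
    have hd1 : (a ++ 'h' :: b).drop a.length = 'h' :: b := drop_at rfl
    have hpatsub : List.Sublist ['h', 'e', 'l', 'l', 'o'] (a ++ 'h' :: b)
        ↔ List.Sublist ['e', 'l', 'l', 'o'] b := sub_through_first a ha
    by_cases he : 'e' ∈ b
    · obtain ⟨a2, b2, rfl, ha2⟩ := split_of_mem he
      have h2 : loopE (('h' : Char) :: (a2 ++ 'e' :: b2)) a.length
          = (a.length + 1 + a2.length, "e") := by
        rw [show loopE (('h' : Char) :: (a2 ++ 'e' :: b2)) a.length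
              = loopE (a2 ++ 'e' :: b2) (a.length + 1) from by simp [loopE],
          loopE_found a2 b2 (a.length + 1) ha2]
      have hd2 : (a ++ 'h' :: (a2 ++ 'e' :: b2)).drop (a.length + 1 + a2.length)
          = 'e' :: b2 := by
        rw [show a ++ 'h' :: (a2 ++ 'e' :: b2) = (a ++ 'h' :: a2) ++ 'e' :: b2 from by simp]
        exact drop_at (by simp; omega)
      have hsub2 : List.Sublist ['h', 'e', 'l', 'l', 'o'] (a ++ 'h' :: (a2 ++ 'e' :: b2))
          ↔ List.Sublist ['l', 'l', 'o'] b2 := by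
        rw [sub_through_first a ha, sub_through_first a2 ha2]
      have hsubv : List.Sublist ['l', 'l', 'o'] (('e' : Char) :: b2)
          ↔ List.Sublist ['l', 'l', 'o'] b2 := sub_cons_of_ne (by decide)
      by_cases hm1 : 'l' ∈ (('e' : Char) :: b2)
      · obtain ⟨p, r, hv, hp⟩ := split_of_mem hm1
        by_cases hm2 : 'l' ∈ r
        · obtain ⟨q, r2, hr, hq⟩ := split_of_mem hm2
          rw [hr] at hv
          have h3' : loopI (('e' : Char) :: b2) (a.length + 1 + a2.length)
              (('e' : Char) :: b2) (a.length + 1 + a2.length)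
              = (a.length + 1 + a2.length + p.length + 1 + q.length, "ll") := by
            rw [hv]; exact loopI_two r2 hp hq
          have hd3 : (a ++ 'h' :: (a2 ++ 'e' :: b2)).drop
              (a.length + 1 + a2.length + p.length + 1 + q.length) = 'l' :: r2 := by
            rw [show a ++ 'h' :: (a2 ++ 'e' :: b2)
                  = ((a ++ 'h' :: a2) ++ ('e' :: b2)) from by simp, hv,
              show ((a ++ 'h' :: a2) ++ (p ++ 'l' :: (q ++ 'l' :: r2)))
                  = ((a ++ 'h' :: a2) ++ (p ++ 'l' :: q)) ++ 'l' :: r2 from by simp]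
            exact drop_at (by simp; omega)
          have hsubr : List.Sublist ['l', 'l', 'o'] (('e' : Char) :: b2) ↔ 'o' ∈ r2 := by
            rw [hv, sub_through_first p hp, sub_through_first q hq, List.singleton_sublist]
          simp only [kateOf, h1, hd1, h2, hd2, h3']
          rw [hd3, hsub2, ← hsubv, hsubr,
            show loopO ('l' :: r2) = loopO r2 from by simp [loopO]]
          by_cases ho : 'o' ∈ r2
          · rw [loopO_mem ho]
            simp only [ho, iff_true]
            decide
          · rw [loopO_not ho]
            simp only [ho, iff_false]
            decide
        · -- exactly one 'l' after the first 'e': the inner search never fires, kate misses "ll"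
          have h3' : loopI (('e' : Char) :: b2) (a.length + 1 + a2.length)
              (('e' : Char) :: b2) (a.length + 1 + a2.length) = (0, "") := by
            rw [hv]; exact loopI_one hp hm2
          simp only [kateOf, h1, hd1, h2, hd2, h3', List.drop_zero]
          refine iff_of_false (kate_no_ll _ (loopO_shape _)) ?_
          intro hs
          have h4 := hsubv.mpr (hsub2.mp hs)
          rw [hv, sub_through_first p hp] at h4
          exact hm2 (h4.mem (by decide))
      · -- no 'l' at all after the first 'e'
        have h3' : loopI (('e' : Char) :: b2) (a.length + 1 + a2.length)
            (('e' : Char) :: b2) (a.length + 1 + a2.length) = (0, "") :=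
          loopI_trail hm1 _
        simp only [kateOf, h1, hd1, h2, hd2, h3', List.drop_zero]
        refine iff_of_false (kate_no_ll _ (loopO_shape _)) ?_
        intro hs
        exact hm1 ((hsubv.mpr (hsub2.mp hs)).mem (by decide))
    · -- no 'e' after the first 'h': kate misses "e"
      have h2' : loopE (('h' : Char) :: b) a.length = (0, "") := by
        rw [show loopE (('h' : Char) :: b) a.length = loopE b (a.length + 1) from by simp [loopE]]
        exact loopE_not he _
      simp only [kateOf, h1, hd1, h2', List.drop_zero]
      refine iff_of_false (kate_no_e _ _ (loopI_shape _ _ _ _) (loopO_shape _)) ?_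
      intro hs
      exact he ((hpatsub.mp hs).mem (by decide))
  · -- no 'h' at all: kate misses the leading "h"
    simp only [kateOf, loopH_not hh 0, List.drop_zero]
    refine iff_of_false (kate_no_h _ _ _ (loopE_shape _ _) (loopI_shape _ _ _ _) (loopO_shape _)) ?_
    intro hs
    exact hh (hs.mem (by decide))

-- the bridge from func's filtered/trimmed string back to the raw input ----

theorem jin_eq (arg0 : String) :
    jinOf arg0 = (if (arg0.toList).contains 'h'
        then (arg0.toList).drop ((arg0.toList).findIdx (fun c => c == 'h'))
        else arg0.toList).filter (fun c => decide (c = 'h' ∨ c = 'e' ∨ c = 'l' ∨ c = 'o')) := by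
  simp only [jinOf]
  rw [PySem.List.foldl_append_ite_eq_filter]
  simp

theorem filter_bridge (u : List Char) :
    List.Sublist pat (u.filter (fun c => decide (c = 'h' ∨ c = 'e' ∨ c = 'l' ∨ c = 'o')))
      ↔ List.Sublist pat u := by
  constructor
  · intro h; exact h.trans List.filter_sublist
  · intro h
    have h2 := h.filter (fun c => decide (c = 'h' ∨ c = 'e' ∨ c = 'l' ∨ c = 'o'))
    rwa [show pat.filter (fun c => decide (c = 'h' ∨ c = 'e' ∨ c = 'l' ∨ c = 'o')) = pat
        from by decide] at h2

theorem trim_bridge (u : List Char) :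
    List.Sublist pat (if u.contains 'h' then u.drop (u.findIdx (fun c => c == 'h')) else u)
      ↔ List.Sublist pat u := by
  by_cases hc : u.contains 'h' = true
  · have hm : 'h' ∈ u := List.contains_iff_mem.mp hc
    obtain ⟨a, b, rfl, ha, hi⟩ := exists_first_split hm
    rw [if_pos hc, hi, drop_at rfl, show pat = ['h', 'e', 'l', 'l', 'o'] from rfl,
      List.cons_sublist_cons, sub_through_first a ha]
  · rw [if_neg hc]

-- ===== VERDICT (by name: the statement is the Claim_ definition above) =====
theorem func_spec : Claim_equal_func := by
  intro arg0 _
  unfold Spec_func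
  rw [func_eq]
  unfold func_alt
  have hiff : (kateOf (jinOf arg0) = "hello")
      ↔ (arg0.toList.foldl stepB ['h', 'e', 'l', 'l', 'o'] = []) := by
    rw [coreA, jin_eq, filter_bridge, trim_bridge,
      show (['h', 'e', 'l', 'l', 'o'] : List Char) = pat from rfl, greedy]
  by_cases hk : kateOf (jinOf arg0) = "hello"
  · rw [if_pos hk, if_pos (hiff.mp hk)]
  · rw [if_neg hk, if_neg (fun h => hk (hiff.mpr h))]
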